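-- pv_equiv track=rewrite | github.com/V0idBorn/Cross-platform-programming-tools | Lab_7/solution.py | matrixSquare
-- ===== SOURCE A (Python) =====
-- def matrixSquare(rowNColumns , symbol):
--
--     matrix = [[None for _ in range(rowNColumns)] for _ in range(rowNColumns)]
--
--     centre = int(rowNColumns / 2)
--
--     i = 0
--     while i < rowNColumns:
--         j = 0
--         if(i < centre):
--             while j < centre:
--                 matrix[i][j] = symbol
--                 j+=1
--         if(i >= centre):
--             j = centre
--             while j < rowNColumns:
--                 matrix[i][j] = symbol
--                 j+=1
--         i += 1
--         j = 0
--     return matrix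
-- ===== SOURCE B (Python) =====
-- def matrixSquare(rowNColumns, symbol):
--     n = rowNColumns
--     if n <= 0:
--         return []
--     c = n // 2
--     # one flat pass: cell at flat index k is filled iff its row-half and column-half agree
--     flat = [symbol if (k // n < c) == (k % n < c) else None for k in range(n * n)]
--     return [flat[r * n:(r + 1) * n] for r in range(n)]
-- ===== Notes on version B (the rewrite author's own statement) =====
-- stated objective: alternative
-- what changed: Replaces A's preallocated None matrix mutated by nested while-loops with a single flat pass over linear indices 0..n*n-1 computing each cell from the closed-form predicate (k//n < centre) == (k%n < centre), then reshaping the flat list into rows by slicing.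
import Mathlib
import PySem

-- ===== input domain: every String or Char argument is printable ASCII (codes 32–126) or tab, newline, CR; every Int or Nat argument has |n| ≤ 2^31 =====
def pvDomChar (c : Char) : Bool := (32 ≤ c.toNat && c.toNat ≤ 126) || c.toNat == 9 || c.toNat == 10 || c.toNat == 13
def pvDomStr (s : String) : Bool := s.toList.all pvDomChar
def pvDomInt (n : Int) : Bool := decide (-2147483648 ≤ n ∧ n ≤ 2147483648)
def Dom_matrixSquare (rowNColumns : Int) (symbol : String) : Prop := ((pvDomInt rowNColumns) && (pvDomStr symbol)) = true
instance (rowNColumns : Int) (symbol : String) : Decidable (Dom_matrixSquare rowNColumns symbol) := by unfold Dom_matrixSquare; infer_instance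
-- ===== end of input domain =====

-- B computes every cell in one flat pass over linear indices by the closed-form predicate
-- (k//n < centre) == (k%n < centre) and reshapes by slicing, instead of A's nested
-- while-loops mutating a preallocated None matrix (objective: alternative).

-- ===== PORT A =====
-- matrix[i][j] = symbol  (A's loops only use in-range i, j)
def pvSetCell (m : List (List (Option String))) (i j : Int) (v : String) :
    List (List (Option String)) :=
  m.set i.toNat ((m.getD i.toNat []).set j.toNat (some v))

-- 'while j < stop: matrix[i][j] = symbol; j += 1' (both inner while-loops have this shape)
def pvLoopJ (m : List (List (Option String))) (i j stop : Int) (v : String) :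
    List (List (Option String)) :=
  if h : j < stop then pvLoopJ (pvSetCell m i j v) i (j + 1) stop v else m
termination_by (stop - j).toNat
decreasing_by omega

-- the outer 'while i < rowNColumns' loop, body as in A (two sequential ifs)
def pvLoopI (m : List (List (Option String))) (i n centre : Int) (v : String) :
    List (List (Option String)) :=
  if h : i < n then
    let m1 := if i < centre then pvLoopJ m i 0 centre v else m
    let m2 := if centre ≤ i then pvLoopJ m1 i centre n v else m1
    pvLoopI m2 (i + 1) n centre v
  else m
termination_by (n - i).toNat
decreasing_by omega

def matrixSquare (rowNColumns : Int) (symbol : String) : List (List (Option String)) :=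
  let matrix := (PySem.List.pyRange 0 rowNColumns 1).map
    (fun _ => (PySem.List.pyRange 0 rowNColumns 1).map (fun _ => (none : Option String)))
  -- int(rowNColumns / 2): float division then truncation toward zero; PySem.Int.truncdiv
  -- is exact for |rowNColumns| ≤ 2^31 < 2^53
  let centre := PySem.Int.truncdiv rowNColumns 2
  pvLoopI matrix 0 rowNColumns centre symbol

-- ===== PORT B =====
def matrixSquare_alt (rowNColumns : Int) (symbol : String) : List (List (Option String)) :=
  let n := rowNColumns
  if n ≤ 0 then [] else
  let c := PySem.Int.floordiv n 2
  -- 'symbol if (k // n < c) == (k % n < c) else None for k in range(n*n)'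
  let flat := (PySem.List.pyRange 0 (n * n) 1).map (fun k =>
    if (PySem.Int.floordiv k n < c) = (PySem.Int.mod k n < c) then some symbol else none)
  -- 'flat[r*n:(r+1)*n] for r in range(n)'
  (PySem.List.pyRange 0 n 1).map (fun r =>
    PySem.List.slice flat (some (r * n)) (some ((r + 1) * n)))

-- ===== PRECONDITION & SPEC =====
def Spec_matrixSquare (rowNColumns : Int) (symbol : String) (out : List (List (Option String))) : Prop := out = matrixSquare_alt rowNColumns symbol
instance (rowNColumns : Int) (symbol : String) (out : List (List (Option String))) : Decidable (Spec_matrixSquare rowNColumns symbol out) := by unfold Spec_matrixSquare; infer_instance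

-- ===== CLAIM (what is proved, stated in full; the proofs are below) =====
def Claim_equal_matrixSquare : Prop := ∀ (rowNColumns : Int) (symbol : String), Dom_matrixSquare rowNColumns symbol → Spec_matrixSquare rowNColumns symbol (matrixSquare rowNColumns symbol)

-- ===== LEMMAS AND PROOFS =====

-- proof-side model of one inner while-loop acting on a single row
def pvRowFill (r : List (Option String)) (j stop : Int) (v : String) : List (Option String) :=
  if h : j < stop then pvRowFill (r.set j.toNat (some v)) (j + 1) stop v else r
termination_by (stop - j).toNat
decreasing_by omega

theorem pvRowFill_length (r : List (Option String)) (j stop : Int) (v : String) :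
    (pvRowFill r j stop v).length = r.length := by
  unfold pvRowFill
  split
  · rw [pvRowFill_length]; simp
  · rfl
termination_by (stop - j).toNat
decreasing_by omega

theorem pvRowFill_getElem? (r : List (Option String)) (j stop : Int) (v : String)
    (hj : 0 ≤ j) (k : Nat) :
    (pvRowFill r j stop v)[k]? =
      if j ≤ (k : Int) ∧ (k : Int) < stop ∧ k < r.length then some (some v) else r[k]? := by
  unfold pvRowFill
  split
  · rename_i h
    rw [pvRowFill_getElem? _ _ _ _ (by omega) k]
    have hjt : (j.toNat : Int) = j := Int.toNat_of_nonneg hj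
    simp only [List.length_set, List.getElem?_set]
    by_cases h1 : j + 1 ≤ (k : Int) ∧ (k : Int) < stop ∧ k < r.length
    · rw [if_pos h1, if_pos ⟨by omega, h1.2⟩]
    · rw [if_neg h1]
      by_cases h2 : j.toNat = k
      · subst h2
        by_cases h3 : j.toNat < r.length
        · rw [if_pos rfl, if_pos h3, if_pos ⟨by omega, by omega, h3⟩]
        · rw [if_pos rfl, if_neg h3, if_neg (by omega)]
          rw [List.getElem?_eq_none (by omega)]
      · rw [if_neg h2, if_neg (by omega)]
  · rename_i h
    rw [if_neg (by omega)]
termination_by (stop - j).toNat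
decreasing_by omega

-- the inner loop only rewrites row i, and does to it what pvRowFill does
theorem pvLoopJ_eq_set (m : List (List (Option String))) (i j stop : Int) (v : String)
    (hi : 0 ≤ i) (hlen : i.toNat < m.length) :
    pvLoopJ m i j stop v = m.set i.toNat (pvRowFill (m.getD i.toNat []) j stop v) := by
  unfold pvLoopJ
  split
  · rename_i h
    rw [pvLoopJ_eq_set _ _ _ _ _ hi (by simp [pvSetCell]; omega)]
    conv_rhs => rw [pvRowFill]
    rw [dif_pos h]
    simp only [pvSetCell, List.set_set]
    congr 1
    congr 1
    rw [List.getD_eq_getElem _ _ (by simpa using hlen), List.getElem_set_self]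
  · rename_i h
    conv_rhs => rw [pvRowFill]
    rw [dif_neg h, List.getD_eq_getElem _ _ hlen, List.set_getElem_self]
termination_by (stop - j).toNat
decreasing_by omega

-- what one body of the outer loop does to row i
def pvFinalRow (r : List (Option String)) (idx centre n : Int) (v : String) :
    List (Option String) :=
  if idx < centre then pvRowFill r 0 centre v else pvRowFill r centre n v

theorem pvLoopI_getElem? (m : List (List (Option String))) (i n centre : Int) (v : String)
    (hi : 0 ≤ i) (hm : n.toNat ≤ m.length) (k : Nat) :
    (pvLoopI m i n centre v)[k]? =
      if i ≤ (k : Int) ∧ (k : Int) < n then some (pvFinalRow (m.getD k []) (k : Int) centre n v)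
      else m[k]? := by
  unfold pvLoopI
  split
  · rename_i h
    have hilen : i.toNat < m.length := by omega
    have hit : (i.toNat : Int) = i := Int.toNat_of_nonneg hi
    have hbody : (if centre ≤ i then
          pvLoopJ (if i < centre then pvLoopJ m i 0 centre v else m) i centre n v
        else (if i < centre then pvLoopJ m i 0 centre v else m)) =
        m.set i.toNat (pvFinalRow (m.getD i.toNat []) i centre n v) := by
      by_cases hc : i < centre
      · rw [if_pos hc, if_neg (by omega), pvLoopJ_eq_set m i 0 centre v hi hilen,
          pvFinalRow, if_pos hc]
      · rw [if_neg hc, if_pos (by omega), pvLoopJ_eq_set m i centre n v hi hilen,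
          pvFinalRow, if_neg hc]
    simp only [hbody]
    rw [pvLoopI_getElem? _ _ _ _ _ (by omega) (by simpa using hm) k]
    by_cases h1 : i + 1 ≤ (k : Int) ∧ (k : Int) < n
    · rw [if_pos h1, if_pos ⟨by omega, h1.2⟩]
      have hk : i.toNat ≠ k := by omega
      have hgd : (m.set i.toNat (pvFinalRow (m.getD i.toNat []) i centre n v)).getD k [] =
          m.getD k [] := by
        simp [List.getD_eq_getElem?_getD, hk]
      rw [hgd]
    · rw [if_neg h1]
      by_cases h2 : i ≤ (k : Int) ∧ (k : Int) < n
      · have hk : k = i.toNat := by omega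
        subst hk
        rw [if_pos h2, List.getElem?_set, if_pos rfl, if_pos hilen]
        congr 2
        omega
      · rw [if_neg h2, List.getElem?_set, if_neg (by omega)]
  · rename_i h
    rw [if_neg (by omega)]
termination_by (n - i).toNat
decreasing_by omega

-- A's final row r, as a function of the entry index: symbol iff the halves agree
theorem pvFinalRow_getElem? (N : Nat) (r centre n : Int) (v : String)
    (hc0 : 0 ≤ centre) (hN : n.toNat = N) (j : Nat) (hj : j < N) :
    (pvFinalRow (List.replicate N (none : Option String)) r centre n v)[j]? =
      some (if (r < centre) = ((j : Int) < centre) then some v else none) := by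
  unfold pvFinalRow
  by_cases hrc : r < centre
  · rw [if_pos hrc, pvRowFill_getElem? _ _ _ _ le_rfl j]
    simp only [List.length_replicate, List.getElem?_replicate, if_pos hj]
    by_cases hjc : (j : Int) < centre
    · rw [if_pos ⟨by omega, hjc, hj⟩, if_pos (by simp [hrc, hjc])]
    · rw [if_neg (by omega), if_neg (by simp [hrc, hjc])]
  · rw [if_neg hrc, pvRowFill_getElem? _ _ _ _ hc0 j]
    simp only [List.length_replicate, List.getElem?_replicate, if_pos hj]
    by_cases hjc : (j : Int) < centre
    · rw [if_neg (by omega), if_neg (by simp [hrc, hjc])]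
    · rw [if_pos ⟨by omega, by omega, hj⟩, if_pos (by simp [hrc, hjc])]

-- decoding the flat index: for 0 ≤ j < n, (j + r*n) // n = r and (j + r*n) % n = j
theorem pvDecode (r j n : Int) (hn : 0 < n) (hj0 : 0 ≤ j) (hjn : j < n) :
    PySem.Int.floordiv (j + r * n) n = r ∧ PySem.Int.mod (j + r * n) n = j := by
  rw [PySem.Int.floordiv_eq_ediv_of_pos hn, PySem.Int.mod_eq_emod_of_pos hn]
  constructor
  · rw [Int.add_mul_ediv_right _ _ (by omega), Int.ediv_eq_zero_of_lt hj0 hjn, zero_add]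
  · rw [mul_comm r n, Int.add_mul_emod_self_left, Int.emod_eq_of_lt hj0 hjn]

-- ===== VERDICT (by name: the statement is the Claim_ definition above) =====
theorem matrixSquare_spec : Claim_equal_matrixSquare := by
  unfold Claim_equal_matrixSquare
  intro n v _
  unfold Spec_matrixSquare matrixSquare matrixSquare_alt
  by_cases hn : n ≤ 0
  · have h0 : PySem.List.pyRange 0 n 1 = [] := PySem.List.pyRange_one_eq_nil (by omega)
    simp [h0, pvLoopI, not_lt.mpr hn, hn]
  · replace hn : 0 < n := by omega
    rw [if_neg (by omega : ¬ n ≤ 0)]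
    have htd : PySem.Int.truncdiv n 2 = PySem.Int.floordiv n 2 := by
      rw [PySem.Int.floordiv_eq_ediv_of_pos (by norm_num)]
      exact Int.tdiv_eq_ediv_of_nonneg (by omega)
    rw [htd]
    set centre := PySem.Int.floordiv n 2 with hc
    have hc0 : 0 ≤ centre := by
      rw [hc, PySem.Int.floordiv_eq_ediv_of_pos (by norm_num)]; omega
    have hcn : centre ≤ n := by
      rw [hc, PySem.Int.floordiv_eq_ediv_of_pos (by norm_num)]; omega
    set N := n.toNat with hNdef
    have hrow : (PySem.List.pyRange 0 n 1).map (fun _ => (none : Option String)) =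
        List.replicate N (none : Option String) := by
      rw [List.map_const', PySem.List.length_pyRange_one]
      congr 1; omega
    rw [hrow]
    apply List.ext_getElem?
    intro k
    rw [pvLoopI_getElem? _ 0 n centre v le_rfl
      (by simp only [List.length_map, PySem.List.length_pyRange_one]; omega) k]
    by_cases hk : (k : Int) < n
    · have hkN : k < (n - 0).toNat := by omega
      rw [if_pos ⟨by omega, hk⟩]
      simp only [List.getElem?_map, PySem.List.getElem?_pyRange_one, if_pos hkN,
        Option.map_some, Option.getD_some, List.getD_eq_getElem?_getD, zero_add]
      congr 1
      -- rows: A's filled row k  =  B's slice of the flat list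
      apply List.ext_getElem?
      intro j
      have hnN : n = (N : Int) := by omega
      have hslice : PySem.List.slice
            ((PySem.List.pyRange 0 (n * n) 1).map (fun t =>
              if (PySem.Int.floordiv t n < centre) = (PySem.Int.mod t n < centre)
              then some v else none))
            (some ((k : Int) * n)) (some (((k : Int) + 1) * n)) =
          ((((PySem.List.pyRange 0 (n * n) 1).map (fun t =>
              if (PySem.Int.floordiv t n < centre) = (PySem.Int.mod t n < centre)
              then some v else none)).drop (k * N)).take N) := by
        rw [PySem.List.slice_toNat,
          show ((k : Int) * n).toNat = k * N by
            rw [hnN, ← Nat.cast_mul, Int.toNat_natCast],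
          show (((k : Int) + 1) * n).toNat = (k + 1) * N by
            rw [hnN, show ((k : Int) + 1) = (((k + 1 : Nat)) : Int) by push_cast; ring,
              ← Nat.cast_mul, Int.toNat_natCast],
          show (k + 1) * N - k * N = N by rw [add_mul, one_mul]; omega]
        · rw [hnN]; positivity
        · rw [hnN]; positivity
      rw [hslice]
      have hNN : (n * n - 0).toNat = N * N := by
        rw [Int.sub_zero, hnN]
        omega
      by_cases hjN : j < N
      · rw [pvFinalRow_getElem? N (k : Int) centre n v hc0 (by omega) j hjN]
        rw [List.getElem?_take, if_pos hjN, List.getElem?_drop, List.getElem?_map,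
          PySem.List.getElem?_pyRange_one]
        have hkidx : k * N + j < (n * n - 0).toNat := by
          rw [hNN]
          have h1 : k * N + j < (k + 1) * N := by rw [add_mul, one_mul]; omega
          have h2 : (k + 1) * N <= N * N := Nat.mul_le_mul_right _ (by omega)
          omega
        rw [if_pos hkidx]
        have hcast : (0 : Int) + ((k * N + j : Nat) : Int) = (j : Int) + (k : Int) * n := by
          rw [hnN]; push_cast; ring
        rw [hcast]
        simp only [Option.map_some]
        rw [(pvDecode (k : Int) (j : Int) n hn (by omega) (by omega)).1,
          (pvDecode (k : Int) (j : Int) n hn (by omega) (by omega)).2]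
      · have hlenA : (pvFinalRow (List.replicate N (none : Option String)) (k : Int) centre n v).length = N := by
          unfold pvFinalRow
          split <;> rw [pvRowFill_length, List.length_replicate]
        rw [List.getElem?_eq_none (by rw [hlenA]; omega),
          List.getElem?_eq_none (by rw [List.length_take]; omega)]
    · rw [if_neg (by omega)]
      simp only [List.getElem?_map, PySem.List.getElem?_pyRange_one,
        if_neg (show ¬ k < (n - 0).toNat by omega), Option.map_none]
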